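-- pv_equiv track=rewrite | github.com/itsjustaksh/School | 4810/Assignment_3/Assignment_3/Task_3/Problem1/ecc.py | validPoints
-- ===== SOURCE A (Python) =====
-- def validPoints(p: int,d: int) -> list:
--
--     allowedPoints = []
--
--     for x in range(p):
--         for y in range(p):
--             lhs = ((x**2) + (y**2)) % p
--             rhs = (1 + ((x**2)*(y**2)*d)) % p
--             if lhs == rhs:
--                 allowedPoints.append((x,y))
--
--     return allowedPoints
-- ===== SOURCE B (Python) =====
-- def validPoints(p: int, d: int) -> list:
--     # Group y-values by the residue of y*y mod p once, then test the curve
--     # equation per distinct square residue instead of per y.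
--     sq = {}
--     for y in range(p):
--         r = (y * y) % p
--         sq[r] = sq.get(r, []) + [y]
--     allowedPoints = []
--     for x in range(p):
--         a = (x * x) % p
--         ys = []
--         for r, group in sq.items():
--             if (a + r) % p == (1 + a * r * d) % p:
--                 ys = ys + group
--         for y in sorted(ys):
--             allowedPoints.append((x, y))
--     return allowedPoints
-- ===== Notes on version B (the rewrite author's own statement) =====
-- stated objective: faster
-- what changed: B precomputes a dict grouping y-values by the residue of y^2 mod p, then for each x tests the curve equation once per distinct square residue (using a = x^2 mod p) and emits the matching y-groups in sorted order, instead of A's full p-by-p double loop re-evaluating the equation for every (x,y) pair.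
import Mathlib
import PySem

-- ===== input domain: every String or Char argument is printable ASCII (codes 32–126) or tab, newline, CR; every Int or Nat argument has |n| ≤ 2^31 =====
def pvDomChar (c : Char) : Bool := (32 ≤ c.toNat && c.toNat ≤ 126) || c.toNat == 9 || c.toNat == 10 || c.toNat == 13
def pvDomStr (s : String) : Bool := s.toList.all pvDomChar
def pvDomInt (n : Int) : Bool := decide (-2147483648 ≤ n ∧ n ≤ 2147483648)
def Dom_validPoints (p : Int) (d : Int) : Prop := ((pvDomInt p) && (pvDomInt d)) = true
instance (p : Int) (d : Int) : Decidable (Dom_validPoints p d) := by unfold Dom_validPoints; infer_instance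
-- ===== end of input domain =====

-- B groups the y-values by the residue of y*y mod p once, then tests the curve equation per
-- distinct square residue instead of per (x, y) pair; measurably faster than A (return value only).

-- ===== PORT A =====
def validPoints (p : Int) (d : Int) : List (Int × Int) :=
  (PySem.List.pyRange 0 p 1).foldl (fun allowedPoints x =>
    (PySem.List.pyRange 0 p 1).foldl (fun allowedPoints y =>
      let lhs := PySem.Int.mod (x ^ 2 + y ^ 2) p
      let rhs := PySem.Int.mod (1 + x ^ 2 * y ^ 2 * d) p
      if lhs == rhs then allowedPoints ++ [(x, y)] else allowedPoints) allowedPoints) []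

-- ===== PORT B =====
def validPoints_alt (p : Int) (d : Int) : List (Int × Int) :=
  let sq : PySem.Dict Int (List Int) :=
    (PySem.List.pyRange 0 p 1).foldl (fun sq y =>
      sq.modify (PySem.Int.mod (y * y) p) [] (fun g => g ++ [y])) PySem.Dict.empty
  (PySem.List.pyRange 0 p 1).foldl (fun allowedPoints x =>
    let a := PySem.Int.mod (x * x) p
    let ys := sq.items.foldl (fun ys rg =>
      if PySem.Int.mod (a + rg.1) p == PySem.Int.mod (1 + a * rg.1 * d) p
      then ys ++ rg.2 else ys) ([] : List Int)
    (PySem.List.sorted ys (fun y => y)).foldl (fun allowedPoints y =>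
      allowedPoints ++ [(x, y)]) allowedPoints) []

-- ===== PRECONDITION & SPEC =====
def Spec_validPoints (p : Int) (d : Int) (out : List (Int × Int)) : Prop := out = validPoints_alt p d
instance (p : Int) (d : Int) (out : List (Int × Int)) : Decidable (Spec_validPoints p d out) := by unfold Spec_validPoints; infer_instance

-- ===== CLAIM (what is proved, stated in full; the proofs are below) =====
def Claim_equal_validPoints : Prop := ∀ (p : Int) (d : Int), Dom_validPoints p d → Spec_validPoints p d (validPoints p d)

-- ===== LEMMAS AND PROOFS =====

-- the common normal form: A's double loop written as filter-then-map per x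
def pvNF (p d : Int) : List (Int × Int) :=
  (PySem.List.pyRange 0 p 1).foldl (fun acc x =>
    acc ++ ((PySem.List.pyRange 0 p 1).filter (fun y =>
      PySem.Int.mod (x ^ 2 + y ^ 2) p == PySem.Int.mod (1 + x ^ 2 * y ^ 2 * d) p)).map
      (fun y => (x, y))) []

lemma pv_A_eq (p d : Int) : validPoints p d = pvNF p d := by
  unfold validPoints pvNF
  apply PySem.List.foldl_congr_mem
  intro acc x _
  exact PySem.List.foldl_append_if _ _ _ _

lemma pv_sum_single (f : Int → Nat) :
    ∀ (K : List Int), K.Nodup → ∀ c0, c0 ∈ K → (∀ c ∈ K, c ≠ c0 → f c = 0) →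
      (K.map f).sum = f c0 := by
  intro K
  induction K with
  | nil => intro _ c0 hc0 _; simp at hc0
  | cons a K ih =>
    intro hnd c0 hc0 h0
    rw [List.map_cons, List.sum_cons]
    rcases List.mem_cons.mp hc0 with rfl | hmem
    · have hz : (K.map f).sum = 0 := List.sum_eq_zero (by
        intro n hn
        rcases List.mem_map.mp hn with ⟨c, hc, rfl⟩
        exact h0 c (List.mem_cons_of_mem _ hc) (fun he => (List.nodup_cons.mp hnd).1 (he ▸ hc)))
      rw [hz]
      omega
    · have ha : f a = 0 := h0 a (by simp) (fun he => (List.nodup_cons.mp hnd).1 (he ▸ hmem))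
      rw [ha, ih (List.nodup_cons.mp hnd).2 c0 hmem
        (fun c hc hne => h0 c (List.mem_cons_of_mem _ hc) hne)]
      omega

lemma pv_perm (k : Int → Int) (q : Int → Bool) (R K : List Int)
    (hnd : K.Nodup) (hsub : ∀ y ∈ R, k y ∈ K) :
    (K.flatMap fun c => if q c then R.filter (fun y => k y == c) else []).Perm
      (R.filter fun y => q (k y)) := by
  rw [List.perm_iff_count]
  intro z
  rw [List.count_flatMap]
  have hcount : ∀ c, List.count z (if q c then R.filter (fun y => k y == c) else [])
      = if c = k z ∧ q c = true then List.count z R else 0 := by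
    intro c
    by_cases hq : q c
    · by_cases hc : c = k z
      · subst hc
        rw [if_pos hq, if_pos ⟨rfl, hq⟩]
        exact List.count_filter (p := fun y => k y == k z) (a := z) (l := R) (by simp)
      · rw [if_pos hq, if_neg (by tauto)]
        refine List.count_eq_zero.mpr ?_
        intro hmem
        have hzc : k z = c := by simpa using (List.mem_filter.mp hmem).2
        exact hc hzc.symm
    · simp [hq]
  have hmap : K.map (List.count z ∘ fun c => if q c then R.filter (fun y => k y == c) else [])
      = K.map (fun c => if c = k z ∧ q c = true then List.count z R else 0) :=
    List.map_congr_left (fun c _ => hcount c)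
  rw [hmap]
  by_cases hz : z ∈ R
  · rw [pv_sum_single (fun c => if c = k z ∧ q c = true then List.count z R else 0) K hnd
      (k z) (hsub z hz) (fun c _ hc => by simp [hc])]
    by_cases hqz : q (k z)
    · rw [if_pos ⟨rfl, hqz⟩, List.count_filter (by simpa using hqz)]
    · rw [if_neg (by tauto)]
      symm
      refine List.count_eq_zero.mpr ?_
      intro hmem
      exact hqz (by simpa using (List.mem_filter.mp hmem).2)
  · have h0 : ∀ c ∈ K, (if c = k z ∧ q c = true then List.count z R else 0) = 0 := by
      intro c _
      split
      · exact List.count_eq_zero.mpr hz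
      · rfl
    rw [List.sum_eq_zero (fun n hn => by
      rcases List.mem_map.mp hn with ⟨c, hc, rfl⟩; exact h0 c hc)]
    symm
    exact List.count_eq_zero.mpr (fun h => hz (List.mem_of_mem_filter h))

lemma pv_cond_eq (p d x : Int) (hp : 0 < p) (y : Int) :
    (PySem.Int.mod (x ^ 2 + y ^ 2) p == PySem.Int.mod (1 + x ^ 2 * y ^ 2 * d) p)
    = (PySem.Int.mod (PySem.Int.mod (x * x) p + PySem.Int.mod (y * y) p) p
       == PySem.Int.mod (1 + PySem.Int.mod (x * x) p * PySem.Int.mod (y * y) p * d) p) := by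
  have hmx : ((x * x) % p) ≡ (x * x) [ZMOD p] := Int.emod_emod_of_dvd _ dvd_rfl
  have hmy : ((y * y) % p) ≡ (y * y) [ZMOD p] := Int.emod_emod_of_dvd _ dvd_rfl
  have h1 : ((x * x) % p + (y * y) % p) % p = (x ^ 2 + y ^ 2) % p := by
    calc ((x * x) % p + (y * y) % p) % p = (x * x + y * y) % p := hmx.add hmy
    _ = (x ^ 2 + y ^ 2) % p := by congr 1; ring
  have h2 : (1 + (x * x) % p * ((y * y) % p) * d) % p = (1 + x ^ 2 * y ^ 2 * d) % p := by
    calc (1 + (x * x) % p * ((y * y) % p) * d) % p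
        = (1 + (x * x) * (y * y) * d) % p := ((hmx.mul hmy).mul (Int.ModEq.refl d)).add_left 1
    _ = (1 + x ^ 2 * y ^ 2 * d) % p := by congr 1; ring
  simp only [PySem.Int.mod_eq_emod_of_pos hp]
  rw [h1, h2]

lemma pv_getD_group (l : List Int) (k : Int → Int) (c : Int) :
    ((l.foldl (fun sq y => sq.modify (k y) [] (fun g => g ++ [y]))
      (PySem.Dict.empty : PySem.Dict Int (List Int)))).getD c []
    = l.filter (fun y => k y == c) := by
  have h := PySem.Dict.getD_foldl_modify_append (l.map (fun y => (k y, y)))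
    (PySem.Dict.empty : PySem.Dict Int (List Int)) c
  rw [List.foldl_map] at h
  rw [h]
  simp [PySem.Dict.getD_empty, List.filter_map, Function.comp_def]

lemma pv_items (l : List Int) (k : Int → Int) :
    ((l.foldl (fun sq y => sq.modify (k y) [] (fun g => g ++ [y]))
      (PySem.Dict.empty : PySem.Dict Int (List Int)))).items
    = (PySem.Set.ofList (l.map k)).map (fun c => (c, l.filter (fun y => k y == c))) := by
  have hnd : ((l.foldl (fun sq y => sq.modify (k y) [] (fun g => g ++ [y]))
      (PySem.Dict.empty : PySem.Dict Int (List Int)))).keys.Nodup :=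
    PySem.Dict.nodup_keys_foldl_modify_key l k [] (fun _ y g => g ++ [y]) PySem.Dict.empty
      (by simp [PySem.Dict.keys_empty])
  rw [PySem.Dict.items_eq_map_keys _ hnd []]
  rw [PySem.Dict.keys_foldl_modify_key l k [] (fun _ y g => g ++ [y]) PySem.Dict.empty]
  rw [PySem.Dict.keys_empty]
  rw [show PySem.Set.update ([] : List Int) (l.map k) = PySem.Set.ofList (l.map k) from rfl]
  exact List.map_congr_left (fun c _ => by rw [pv_getD_group l k c])

lemma pv_foldl_if_extend (c : Int → Bool) (items : List (Int × List Int)) :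
    items.foldl (fun ys rg => if c rg.1 then ys ++ rg.2 else ys) [] =
      items.flatMap (fun rg => if c rg.1 then rg.2 else []) := by
  have h : (fun (ys : List Int) (rg : Int × List Int) => if c rg.1 then ys ++ rg.2 else ys)
      = fun ys rg => ys ++ (if c rg.1 then rg.2 else []) := by
    funext ys rg
    by_cases hc : c rg.1 <;> simp [hc]
  rw [h, PySem.List.foldl_append_eq_flatMap]
  rfl

lemma pv_B_eq (p d : Int) (hp : 0 < p) : validPoints_alt p d = pvNF p d := by
  unfold validPoints_alt pvNF
  apply PySem.List.foldl_congr_mem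
  intro acc x _
  rw [PySem.List.foldl_append_singleton_eq_map]
  congr 1
  rw [pv_foldl_if_extend (fun r => PySem.Int.mod (PySem.Int.mod (x * x) p + r) p
      == PySem.Int.mod (1 + PySem.Int.mod (x * x) p * r * d) p) _]
  rw [pv_items (PySem.List.pyRange 0 p 1) (fun y => PySem.Int.mod (y * y) p)]
  simp only [List.flatMap_map]
  have hfil : (PySem.List.pyRange 0 p 1).filter
      (fun y => PySem.Int.mod (PySem.Int.mod (x * x) p + PySem.Int.mod (y * y) p) p
        == PySem.Int.mod (1 + PySem.Int.mod (x * x) p * PySem.Int.mod (y * y) p * d) p)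
      = (PySem.List.pyRange 0 p 1).filter (fun y =>
        PySem.Int.mod (x ^ 2 + y ^ 2) p == PySem.Int.mod (1 + x ^ 2 * y ^ 2 * d) p) :=
    List.filter_congr (fun y _ => (pv_cond_eq p d x hp y).symm)
  have hperm := pv_perm (fun y => PySem.Int.mod (y * y) p)
    (fun r => PySem.Int.mod (PySem.Int.mod (x * x) p + r) p
      == PySem.Int.mod (1 + PySem.Int.mod (x * x) p * r * d) p)
    (PySem.List.pyRange 0 p 1)
    (PySem.Set.ofList ((PySem.List.pyRange 0 p 1).map (fun y => PySem.Int.mod (y * y) p)))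
    (PySem.Set.nodup_ofList _)
    (fun y hy => (PySem.Set.mem_ofList _ _).mpr (List.mem_map_of_mem hy))
  rw [hfil] at hperm
  rw [PySem.List.sorted_eq_of_perm_of_pairwise_lt _ _ (fun y : Int => y) hperm.symm
    ((PySem.List.pairwise_lt_pyRange_one 0 p).filter _)]
lemma pv_main (p d : Int) : validPoints p d = validPoints_alt p d := by
  by_cases hp0 : p ≤ 0
  · simp [validPoints, validPoints_alt, PySem.List.pyRange_one_eq_nil hp0]
  · rw [pv_A_eq, pv_B_eq p d (by omega)]

-- ===== VERDICT (by name: the statement is the Claim_ definition above) =====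
theorem validPoints_spec : Claim_equal_validPoints := by
  intro p d _
  exact pv_main p d
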